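-- pv_equiv track=rewrite | github.com/prskid1000/telecode | bot/live.py | safe_split
-- ===== SOURCE A (Python) =====
-- def _escape_expansion(ch: str) -> int:
--     """Extra chars ``html.escape`` adds for a single character (0 for most)."""
--     if ch == "&":
--         return 4  # &amp;
--     if ch == "<" or ch == ">":
--         return 3  # &lt; / &gt;
--     return 0
--
-- def _escape_prefix_sums(text: str) -> list[int]:
--     """Cumulative escaped length of ``text[:i]``; ``prefix[0] == 0``.
--
--     Enables ``O(1)`` lookup of ``escaped_len(text[:k])`` for any ``k`` and
--     therefore ``O(log n)`` binary-search in :func:`safe_split` (replaces the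
--     old quadratic step-back loop).
--     """
--     prefix: list[int] = [0] * (len(text) + 1)
--     total = 0
--     for i, ch in enumerate(text):
--         total += 1 + _escape_expansion(ch)
--         prefix[i + 1] = total
--     return prefix
--
-- def safe_split(text: str, limit: int, last_sent: str) -> int:
--     """Find an index so ``text[:index]`` fits within ``limit`` *after escaping*.
--
--     Prefers splitting on a newline to avoid cutting mid-line. If ``last_sent``
--     is non-empty, we split exactly at its boundary so the already-delivered
--     head stays and the remainder overflows into a fresh message.
--     """
--     if last_sent:
--         return len(last_sent)
--     if not text:
--         return 0
--
--     prefix = _escape_prefix_sums(text)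
--     # Binary-search the rightmost ``k`` with ``prefix[k] <= limit``.
--     lo, hi = 1, len(text)
--     best = 1
--     while lo <= hi:
--         mid = (lo + hi) // 2
--         if prefix[mid] <= limit:
--             best = mid
--             lo = mid + 1
--         else:
--             hi = mid - 1
--     # Prefer a newline boundary inside the fitting window.
--     nl = text.rfind("\n", 0, best)
--     if nl > 0:
--         return nl + 1
--     return best
-- ===== SOURCE B (Python) =====
-- def _escape_expansion(ch: str) -> int:
--     """Extra chars ``html.escape`` adds for a single character (0 for most)."""
--     if ch == "&":
--         return 4  # &amp;
--     if ch == "<" or ch == ">":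
--         return 3  # &lt; / &gt;
--     return 0
--
-- def safe_split(text: str, limit: int, last_sent: str) -> int:
--     """Single forward scan with a running escaped-length total; no prefix-sum
--     table and no binary search."""
--     if last_sent:
--         return len(last_sent)
--     if not text:
--         return 0
--     total = 0
--     best = 1
--     i = 1
--     for ch in text:
--         total += 1 + _escape_expansion(ch)
--         if total > limit:
--             break
--         best = i
--         i += 1
--     nl = text.rfind("\n", 0, best)
--     return nl + 1 if nl > 0 else best
-- ===== Notes on version B (the rewrite author's own statement) =====
-- stated objective: simpler
-- what changed: Replaces the prefix-sum table plus binary search with a single forward scan keeping a running escaped-length accumulator that stops at the first position exceeding the limit.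
import Mathlib
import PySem

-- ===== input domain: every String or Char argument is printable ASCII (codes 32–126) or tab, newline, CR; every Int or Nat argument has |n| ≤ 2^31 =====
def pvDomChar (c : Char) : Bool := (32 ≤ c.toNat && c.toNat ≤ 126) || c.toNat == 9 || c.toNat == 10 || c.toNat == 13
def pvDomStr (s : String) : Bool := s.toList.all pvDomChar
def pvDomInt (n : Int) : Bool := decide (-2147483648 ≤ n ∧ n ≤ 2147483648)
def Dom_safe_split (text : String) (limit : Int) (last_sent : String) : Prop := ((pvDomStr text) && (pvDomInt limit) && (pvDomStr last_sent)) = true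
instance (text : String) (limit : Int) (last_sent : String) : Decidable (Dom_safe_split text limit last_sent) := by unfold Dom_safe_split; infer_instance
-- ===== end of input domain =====

-- B replaces A's prefix-sum table + binary search by a single forward scan with a
-- running escaped-length accumulator (objective: simpler; same return value everywhere).

-- ===== PORT A =====

-- _escape_expansion (shared helper of both Python files)
def escExp (c : Char) : Int :=
  if c = '&' then 4
  else if c = '<' ∨ c = '>' then 3
  else 0

-- _escape_prefix_sums: Python preallocates [0]*(n+1) and writes prefix[i+1] = total
-- sequentially; writing slot i+1 right after slots 0..i is exactly appending.
def prefixStep (acc : List Int × Int) (c : Char) : List Int × Int :=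
  let total := acc.2 + 1 + escExp c
  (acc.1 ++ [total], total)

def prefixSums (cs : List Char) : List Int :=
  (cs.foldl prefixStep ([0], 0)).1

-- the while-loop of A's binary search; fuel only makes the recursion structural,
-- it is never exhausted on the calls the port makes (fuel = len(text) ≥ hi+1-lo).
def bsearchA (pfx : List Int) (limit : Int) : Nat → Int → Int → Int → Int
  | 0, _, _, best => best
  | fuel + 1, lo, hi, best =>
    if lo ≤ hi then
      let mid := PySem.Int.floordiv (lo + hi) 2
      -- prefix[mid]: mid is always in range here, so the defaulted read is exact
      if PySem.List.pyGetD pfx mid 0 ≤ limit then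
        bsearchA pfx limit fuel (mid + 1) hi mid
      else
        bsearchA pfx limit fuel lo (mid - 1) best
    else best

-- text.rfind("\n", 0, stop): greatest index i with 0 ≤ i < stop and text[i] = '\n', else -1
-- (exact for 0 ≤ stop ≤ len, which is how both ports call it).
def rfindNl (cs : List Char) (stop : Int) : Int :=
  (cs.foldl (fun (p : Int × Int) c =>
      (p.1 + 1, if c = '\n' ∧ p.1 < stop then p.1 else p.2)) (0, -1)).2

def safe_split (text : String) (limit : Int) (last_sent : String) : Int :=
  if last_sent.toList ≠ [] then (last_sent.toList.length : Int)
  else if text.toList = [] then 0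
  else
    let cs := text.toList
    let pfx := prefixSums cs
    let best := bsearchA pfx limit cs.length 1 (cs.length : Int) 1
    let nl := rfindNl cs best
    if nl > 0 then nl + 1 else best

-- ===== PORT B =====

-- B's for-loop: running total, best, 1-based position; stops at the first overflow.
def altLoop (limit : Int) : Int → Int → Int → List Char → Int
  | _, best, _, [] => best
  | total, best, i, c :: rest =>
    let t := total + 1 + escExp c
    if t > limit then best
    else altLoop limit t i (i + 1) rest

def safe_split_alt (text : String) (limit : Int) (last_sent : String) : Int :=
  if last_sent.toList ≠ [] then (last_sent.toList.length : Int)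
  else if text.toList = [] then 0
  else
    let best := altLoop limit 0 1 1 text.toList
    let nl := rfindNl text.toList best
    if nl > 0 then nl + 1 else best

-- ===== PRECONDITION & SPEC =====
def Spec_safe_split (text : String) (limit : Int) (last_sent : String) (out : Int) : Prop := out = safe_split_alt text limit last_sent
instance (text : String) (limit : Int) (last_sent : String) (out : Int) : Decidable (Spec_safe_split text limit last_sent out) := by unfold Spec_safe_split; infer_instance

-- ===== CLAIM (what is proved, stated in full; the proofs are below) =====
def Claim_equal_safe_split : Prop := ∀ (text : String) (limit : Int) (last_sent : String), Dom_safe_split text limit last_sent → Spec_safe_split text limit last_sent (safe_split text limit last_sent)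

-- ===== LEMMAS AND PROOFS =====

-- escaped length of a prefix
def pref : List Char → Int
  | [] => 0
  | c :: r => 1 + escExp c + pref r

-- length of the longest prefix whose escaped length (on top of `total`) fits
def fitCount (limit : Int) : Int → List Char → Int
  | _, [] => 0
  | total, c :: r =>
    let t := total + 1 + escExp c
    if t ≤ limit then 1 + fitCount limit t r else 0

lemma escExp_nonneg (c : Char) : 0 ≤ escExp c := by
  unfold escExp; split_ifs <;> norm_num

lemma pref_nonneg (cs : List Char) : 0 ≤ pref cs := by
  induction cs with
  | nil => simp [pref]
  | cons c r ih => have := escExp_nonneg c; simp [pref]; omega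

lemma fit_nonneg (limit : Int) (total : Int) (cs : List Char) :
    0 ≤ fitCount limit total cs := by
  induction cs generalizing total with
  | nil => simp [fitCount]
  | cons c r ih =>
    simp only [fitCount]
    split_ifs with h
    · have := ih (total + 1 + escExp c); omega
    · omega

lemma fit_le_len (limit : Int) (total : Int) (cs : List Char) :
    fitCount limit total cs ≤ (cs.length : Int) := by
  induction cs generalizing total with
  | nil => simp [fitCount]
  | cons c r ih =>
    simp only [fitCount, List.length_cons]
    split_ifs with h
    · have := ih (total + 1 + escExp c); push_cast; omega
    · push_cast; have : (0:Int) ≤ (r.length : Int) := by positivity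
      omega

-- k-th prefix fits iff k ≤ fitCount (monotonicity of the escaped length)
lemma fit_iff (cs : List Char) (limit : Int) : ∀ (total : Int) (k : Nat), 1 ≤ k → k ≤ cs.length →
    (total + pref (cs.take k) ≤ limit ↔ (k : Int) ≤ fitCount limit total cs) := by
  induction cs with
  | nil => intro total k hk hlen; simp at hlen; omega
  | cons c r ih =>
    intro total k hk hlen
    obtain ⟨j, rfl⟩ : ∃ j, k = j + 1 := ⟨k - 1, by omega⟩
    simp only [List.take_succ_cons, pref, fitCount]
    rcases Nat.eq_zero_or_pos j with hj | hj
    · subst hj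
      simp only [List.take_zero, pref]
      split_ifs with h
      · have := fit_nonneg limit (total + 1 + escExp c) r
        constructor <;> intro <;> push_cast <;> omega
      · constructor <;> intro h2
        · exfalso; omega
        · norm_num at h2
    · have hlen' : j ≤ r.length := by simpa using hlen
      have hiff := ih (total + 1 + escExp c) j hj hlen'
      split_ifs with h
      · constructor <;> intro h2
        · have : (j:Int) ≤ fitCount limit (total + 1 + escExp c) r := by
            rw [← hiff]; omega
          push_cast; omega
        · have : (j:Int) ≤ fitCount limit (total + 1 + escExp c) r := by push_cast at h2; omega
          rw [← hiff] at this; omega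
      · have hp := pref_nonneg (r.take j)
        constructor <;> intro h2
        · exfalso; omega
        · exfalso; push_cast at h2; omega

-- B's loop computes max 1 (fitCount …)
lemma altLoop_eq (limit : Int) : ∀ (cs : List Char) (total best i : Int),
    altLoop limit total best i cs =
      if fitCount limit total cs = 0 then best else i - 1 + fitCount limit total cs := by
  intro cs
  induction cs with
  | nil => intro total best i; simp [altLoop, fitCount]
  | cons c r ih =>
    intro total best i
    simp only [altLoop, fitCount]
    by_cases h : total + 1 + escExp c ≤ limit
    · rw [if_neg (by omega : ¬ total + 1 + escExp c > limit), if_pos h, ih]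
      have := fit_nonneg limit (total + 1 + escExp c) r
      split_ifs <;> omega
    · rw [if_pos (by omega : total + 1 + escExp c > limit), if_neg h]
      simp

-- the prefix-sum list is the table of pref over all prefixes
lemma foldl_prefixStep (cs : List Char) : ∀ (acc : List Int) (t : Int),
    (cs.foldl prefixStep (acc, t)).1
      = acc ++ (List.range cs.length).map (fun k => t + pref (cs.take (k + 1))) := by
  induction cs with
  | nil => intro acc t; simp
  | cons c r ih =>
    intro acc t
    simp only [List.foldl_cons, prefixStep, List.length_cons, List.range_succ_eq_map]
    rw [ih]
    simp only [List.map_cons, List.map_map]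
    have h0 : t + 1 + escExp c = t + pref ((c :: r).take (0 + 1)) := by
      simp [pref]; ring
    have h1 : ((fun k => t + pref ((c :: r).take (k + 1))) ∘ Nat.succ)
        = fun k => t + 1 + escExp c + pref (r.take (k + 1)) := by
      funext k
      simp [Function.comp, pref]; ring
    rw [h1, ← h0]
    simp

lemma prefixSums_eq (cs : List Char) :
    prefixSums cs = (List.range (cs.length + 1)).map (fun k => pref (cs.take k)) := by
  unfold prefixSums
  rw [foldl_prefixStep]
  rw [List.range_succ_eq_map]
  simp only [List.map_cons, List.map_map]
  have : ((fun k => pref (cs.take k)) ∘ Nat.succ) = fun k => 0 + pref (cs.take (k + 1)) := by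
    funext k; simp [Function.comp]
  rw [this]
  simp [pref]

-- prefix[mid] for 1 ≤ mid ≤ len
lemma prefixSums_get (cs : List Char) (mid : Int) (h1 : 1 ≤ mid) (h2 : mid ≤ (cs.length : Int)) :
    PySem.List.pyGetD (prefixSums cs) mid 0 = pref (cs.take mid.toNat) := by
  rw [prefixSums_eq]
  rw [PySem.List.pyGetD_eq_getElem _ 0 (by omega)
      (by simp only [List.length_map, List.length_range]; push_cast; omega)]
  rw [List.getElem_map, List.getElem_range]

-- A's binary search converges to max 1 (fitCount limit 0 cs)
lemma bsearch_inv (cs : List Char) (limit : Int) :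
    ∀ (fuel : Nat) (lo hi best : Int),
      (hi + 1 - lo).toNat ≤ fuel → 1 ≤ lo → fitCount limit 0 cs ≤ hi → hi ≤ (cs.length : Int) →
      best = max 1 (min (fitCount limit 0 cs) (lo - 1)) →
      bsearchA (prefixSums cs) limit fuel lo hi best = max 1 (fitCount limit 0 cs) := by
  intro fuel
  induction fuel with
  | zero =>
    intro lo hi best hfuel hlo hm hhi hbest
    have : ¬ lo ≤ hi := by omega
    simp only [bsearchA]
    omega
  | succ fuel ih =>
    intro lo hi best hfuel hlo hm hhi hbest
    simp only [bsearchA]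
    by_cases hcmp : lo ≤ hi
    · simp only [if_pos hcmp]
      have hmid := PySem.Int.floordiv_two_mid_bounds hcmp
      set mid := PySem.Int.floordiv (lo + hi) 2 with hmiddef
      have hmid1 : 1 ≤ mid := by omega
      have hmidn : mid ≤ (cs.length : Int) := by omega
      have hfit := fit_iff cs limit 0 mid.toNat (by omega) (by omega)
      have hcast : ((mid.toNat : Nat) : Int) = mid := by omega
      rw [hcast] at hfit
      rw [prefixSums_get cs mid hmid1 hmidn]
      have hm0 := fit_nonneg limit 0 cs
      by_cases hle : 0 + pref (cs.take mid.toNat) ≤ limit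
      · have hfits : mid ≤ fitCount limit 0 cs := hfit.mp hle
        rw [if_pos (by omega : pref (cs.take mid.toNat) ≤ limit)]
        exact ih (mid + 1) hi mid (by omega) (by omega) hm hhi (by omega)
      · have hnofit : ¬ mid ≤ fitCount limit 0 cs := fun h => hle (hfit.mpr h)
        rw [if_neg (by omega : ¬ pref (cs.take mid.toNat) ≤ limit)]
        exact ih lo (mid - 1) best (by omega) hlo (by omega) (by omega) hbest
    · simp only [if_neg hcmp]
      omega

lemma best_eq (cs : List Char) (limit : Int) (hne : cs ≠ []) :
    bsearchA (prefixSums cs) limit cs.length 1 (cs.length : Int) 1 = altLoop limit 0 1 1 cs := by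
  have hlen : 1 ≤ (cs.length : Int) := by
    have : 0 < cs.length := List.length_pos_of_ne_nil hne
    omega
  have hm0 := fit_nonneg limit 0 cs
  have hmn := fit_le_len limit 0 cs
  rw [bsearch_inv cs limit cs.length 1 (cs.length : Int) 1 (by omega) (by omega) (by omega)
      (le_refl _) (by omega)]
  rw [altLoop_eq]
  split_ifs with h <;> omega

-- ===== VERDICT (by name: the statement is the Claim_ definition above) =====
theorem safe_split_spec : Claim_equal_safe_split := by
  intro text limit last_sent _
  unfold Spec_safe_split safe_split safe_split_alt
  by_cases h1 : last_sent.toList ≠ []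
  · simp [h1]
  · simp only [if_neg h1]
    by_cases h2 : text.toList = []
    · simp [h2]
    · simp only [if_neg h2]
      rw [best_eq text.toList limit h2]
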